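-- pv_equiv track=rewrite | github.com/Satyam-10124/Ginie_Daml | backend/rag/loader.py | _chunk_daml_file
-- ===== SOURCE A (Python) =====
-- def _chunk_daml_file(content: str, file_name: str) -> list[dict]:
--     chunks = []
--     chunks.append({"type": "full_file", "content": content})
--
--     lines = content.split("\n")
--     current_template = []
--     in_template = False
--     template_name = ""
--
--     for line in lines:
--         stripped = line.strip()
--         if stripped.startswith("template "):
--             if current_template and template_name:
--                 chunks.append({
--                     "type":    "template",
--                     "content": "\n".join(current_template),
--                 })
--             template_name = stripped.replace("template ", "").strip()
--             current_template = [line]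
--             in_template = True
--         elif in_template:
--             current_template.append(line)
--
--     if current_template and template_name:
--         chunks.append({
--             "type":    "template",
--             "content": "\n".join(current_template),
--         })
--
--     return chunks
-- ===== SOURCE B (Python) =====
-- def _chunk_daml_file(content: str, file_name: str) -> list[dict]:
--     lines = content.split("\n")
--     marks = [(i, line) for i, line in enumerate(lines)
--              if line.strip().startswith("template ")]
--     chunks = [{"type": "full_file", "content": content}]
--     for k, (i, line) in enumerate(marks):
--         end = marks[k + 1][0] if k + 1 < len(marks) else len(lines)
--         name = line.strip().replace("template ", "").strip()
--         if name:
--             chunks.append({"type": "template", "content": "\n".join(lines[i:end])})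
--     return chunks
-- ===== Notes on version B (the rewrite author's own statement) =====
-- stated objective: alternative
-- what changed: Replaced the stateful in_template/current_template accumulator loop by a two-phase index-then-slice decomposition: first collect the (index, line) pairs of template-header lines, then emit each chunk as a join of a slice between consecutive boundary indices.
import Mathlib
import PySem

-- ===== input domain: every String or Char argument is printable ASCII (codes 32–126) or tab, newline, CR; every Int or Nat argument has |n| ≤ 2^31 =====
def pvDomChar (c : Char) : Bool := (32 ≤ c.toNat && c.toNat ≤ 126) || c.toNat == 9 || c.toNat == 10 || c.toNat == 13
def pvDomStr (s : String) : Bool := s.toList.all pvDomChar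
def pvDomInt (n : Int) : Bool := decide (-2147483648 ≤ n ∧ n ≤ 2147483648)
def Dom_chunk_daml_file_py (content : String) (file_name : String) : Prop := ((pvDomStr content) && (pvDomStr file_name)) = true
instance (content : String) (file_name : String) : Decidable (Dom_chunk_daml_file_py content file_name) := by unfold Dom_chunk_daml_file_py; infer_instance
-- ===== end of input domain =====

-- B replaces A's stateful accumulator loop with a two-phase boundary-index-then-slice decomposition (objective: alternative, same cost).

-- ===== PORT A =====
-- the dict literal {"type": "template", "content": "\n".join(block)} both Pythons build
def pvTemplateChunk (block : List String) : List (String × String) :=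
  [("type", "template"), ("content", PySem.Str.join "\n" block)]

structure PVSt where
  chunks : List (List (String × String))
  cur : List String
  inT : Bool
  name : String

def pvAStep (s : PVSt) (line : String) : PVSt :=
  let stripped := PySem.Str.strip line
  if PySem.Str.startswith stripped "template " then
    { chunks := if s.cur ≠ [] ∧ s.name ≠ "" then s.chunks ++ [pvTemplateChunk s.cur] else s.chunks,
      cur := [line], inT := true,
      name := PySem.Str.strip (PySem.Str.replace stripped "template " "") }
  else if s.inT then { s with cur := s.cur ++ [line] }
  else s

-- the trailing "if current_template and template_name: append" of A
def pvAFinal (s : PVSt) : List (List (String × String)) :=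
  if s.cur ≠ [] ∧ s.name ≠ "" then s.chunks ++ [pvTemplateChunk s.cur] else s.chunks

def chunk_daml_file_py (content : String) (file_name : String) : List (List (String × String)) :=
  pvAFinal (((PySem.Str.split? content "\n").getD []).foldl pvAStep
    { chunks := [[("type", "full_file"), ("content", content)]], cur := [], inT := false, name := "" })

-- ===== PORT B =====
-- the per-boundary loop of Source B: marks carries (index, line); lookahead = head of the remaining marks
-- "marks[k+1][0] if k+1 < len(marks) else len(lines)": first index of the remaining marks, else the default
def pvNxt (d : Int) : List (Int × String) → Int
  | [] => d
  | (j, _) :: _ => j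

def pvBEmit (lines : List String) : List (Int × String) → List (List (String × String))
  | [] => []
  | (i, line) :: rest =>
    let nxt : Int := pvNxt (lines.length : Int) rest
    let name := PySem.Str.strip (PySem.Str.replace (PySem.Str.strip line) "template " "")
    (if name ≠ "" then [pvTemplateChunk (PySem.List.slice lines (some i) (some nxt))] else []) ++ pvBEmit lines rest

def chunk_daml_file_py_alt (content : String) (file_name : String) : List (List (String × String)) :=
  [[("type", "full_file"), ("content", content)]] ++
    pvBEmit ((PySem.Str.split? content "\n").getD [])
      ((PySem.List.enumerate ((PySem.Str.split? content "\n").getD []) 0).filter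
        (fun p => PySem.Str.startswith (PySem.Str.strip p.2) "template "))

-- ===== PRECONDITION & SPEC =====
def Spec_chunk_daml_file_py (content : String) (file_name : String) (out : List (List (String × String))) : Prop := out = chunk_daml_file_py_alt content file_name
instance (content : String) (file_name : String) (out : List (List (String × String))) : Decidable (Spec_chunk_daml_file_py content file_name out) := by unfold Spec_chunk_daml_file_py; infer_instance

-- ===== CLAIM (what is proved, stated in full; the proofs are below) =====
def Claim_equal_chunk_daml_file_py : Prop := ∀ (content : String) (file_name : String), Dom_chunk_daml_file_py content file_name → Spec_chunk_daml_file_py content file_name (chunk_daml_file_py content file_name)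

-- ===== LEMMAS AND PROOFS =====

-- boundary test and template name, shorthand for the proofs
def pvB (l : String) : Bool := PySem.Str.startswith (PySem.Str.strip l) "template "
def pvName (l : String) : String := PySem.Str.strip (PySem.Str.replace (PySem.Str.strip l) "template " "")

-- common functional shape of both programs' template-chunk lists
def pvG : List String → List (List (String × String))
  | [] => []
  | l :: ls =>
    (if pvB l then (if pvName l ≠ "" then [pvTemplateChunk (l :: ls.takeWhile (fun x => !pvB x))] else []) else []) ++ pvG ls

theorem pvTakeWhile_take {α : Type} (p : α → Bool) (ls : List α) :
    ls.take ((ls.takeWhile p).length) = ls.takeWhile p := by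
  induction ls with
  | nil => rfl
  | cons x xs ih => by_cases h : p x <;> simp [h, ih]

theorem pvA_loop_inT (ls : List String) (C : List (List (String × String))) (cur : List String) (n : String)
    (hc : cur ≠ []) :
    pvAFinal (ls.foldl pvAStep { chunks := C, cur := cur, inT := true, name := n })
    = C ++ (if n ≠ "" then [pvTemplateChunk (cur ++ ls.takeWhile (fun x => !pvB x))] else []) ++ pvG ls := by
  induction ls generalizing C cur n with
  | nil =>
    simp [pvAFinal, pvG, hc]
    split_ifs <;> simp
  | cons l ls ih =>
    by_cases hb : pvB l
    · have hstep : pvAStep { chunks := C, cur := cur, inT := true, name := n } l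
          = { chunks := if cur ≠ [] ∧ n ≠ "" then C ++ [pvTemplateChunk cur] else C,
              cur := [l], inT := true, name := pvName l } := by
        simp [pvAStep, pvB, pvName] at hb ⊢
        simp [hb]
      rw [List.foldl_cons, hstep, ih _ _ _ (by simp)]
      by_cases hn : n = "" <;>
        simp [pvG, hb, hn, hc, List.append_assoc]
    · have hstep : pvAStep { chunks := C, cur := cur, inT := true, name := n } l
          = { chunks := C, cur := cur ++ [l], inT := true, name := n } := by
        simp [pvAStep, pvB] at hb ⊢
        simp [hb]
      rw [List.foldl_cons, hstep, ih _ _ _ (by simp [hc])]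
      simp [pvG, hb, List.append_assoc]

theorem pvA_loop_pre (ls : List String) (C : List (List (String × String))) :
    pvAFinal (ls.foldl pvAStep { chunks := C, cur := [], inT := false, name := "" })
    = C ++ pvG ls := by
  induction ls generalizing C with
  | nil => simp [pvAFinal, pvG]
  | cons l ls ih =>
    by_cases hb : pvB l
    · have hstep : pvAStep { chunks := C, cur := [], inT := false, name := "" } l
          = { chunks := C, cur := [l], inT := true, name := pvName l } := by
        simp [pvAStep, pvB, pvName] at hb ⊢
        simp [hb]
      rw [List.foldl_cons, hstep, pvA_loop_inT ls C [l] (pvName l) (by simp)]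
      by_cases hn : pvName l = "" <;> simp [pvG, hb, hn, List.append_assoc]
    · have hstep : pvAStep { chunks := C, cur := [], inT := false, name := "" } l
          = { chunks := C, cur := [], inT := false, name := "" } := by
        simp [pvAStep, pvB] at hb ⊢
        simp [hb]
      rw [List.foldl_cons, hstep, ih C]
      simp [pvG, hb]

theorem pvNxt_lemma (ls pre : List String) :
    pvNxt (((pre ++ ls).length : Nat) : Int) ((PySem.List.enumerate ls (pre.length : Int)).filter (fun p => PySem.Str.startswith (PySem.Str.strip p.2) "template "))
    = ((pre.length + (ls.takeWhile (fun x => !pvB x)).length : Nat) : Int) := by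
  induction ls generalizing pre with
  | nil => simp [pvNxt, pvB]
  | cons l ls ih =>
    rw [PySem.List.enumerate_cons, List.filter_cons]
    by_cases hb : pvB l
    · simp [pvB] at hb
      simp [hb, pvNxt, pvB]
    · have hb0 : pvB l = false := by
        unfold pvB; simpa [pvB] using hb
      have hb' : PySem.Str.startswith (PySem.Str.strip l) "template " = false := hb0
      have h2 := ih (pre ++ [l])
      simp only [hb', Bool.false_eq_true, if_false, List.takeWhile_cons, hb0, Bool.not_false, if_true]
      rw [show ((pre.length : Int) + 1) = (((pre ++ [l]).length : Nat) : Int) by simp,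
          show (pre ++ l :: ls) = ((pre ++ [l]) ++ ls) by simp, h2]
      push_cast
      simp
      omega

theorem pvBEmit_eq_pvG (ls pre : List String) :
    pvBEmit (pre ++ ls) ((PySem.List.enumerate ls (pre.length : Int)).filter (fun p => PySem.Str.startswith (PySem.Str.strip p.2) "template "))
    = pvG ls := by
  induction ls generalizing pre with
  | nil => simp [pvBEmit, pvG]
  | cons l ls ih =>
    rw [PySem.List.enumerate_cons, List.filter_cons]
    by_cases hb : pvB l
    · have hb' : PySem.Str.startswith (PySem.Str.strip l) "template " = true := hb
      simp only [hb', if_true]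
      rw [pvBEmit]
      have hnxt := pvNxt_lemma ls (pre ++ [l])
      rw [show ((pre.length : Int) + 1) = (((pre ++ [l]).length : Nat) : Int) by simp] at *
      rw [show (pre ++ l :: ls) = ((pre ++ [l]) ++ ls) by simp] at *
      rw [hnxt, ih (pre ++ [l])]
      have hslice : PySem.List.slice ((pre ++ [l]) ++ ls) (some ((pre.length : Nat) : Int))
          (some (((pre ++ [l]).length + (ls.takeWhile (fun x => !pvB x)).length : Nat) : Int))
          = l :: ls.takeWhile (fun x => !pvB x) := by
        rw [PySem.List.slice_natCast, show (pre ++ [l]) ++ ls = pre ++ (l :: ls) by simp,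
            List.drop_left' (by simp : pre.length = pre.length)]
        have : (pre ++ [l]).length + (ls.takeWhile (fun x => !pvB x)).length - pre.length
            = (ls.takeWhile (fun x => !pvB x)).length + 1 := by simp; omega
        rw [this]
        simp [pvTakeWhile_take]
      rw [hslice]
      rw [pvG]
      simp only [hb, if_true, pvName]
      rfl
    · have hb' : PySem.Str.startswith (PySem.Str.strip l) "template " = false := by
        unfold pvB at hb; simpa using hb
      simp only [hb', Bool.false_eq_true, if_false]
      rw [show ((pre.length : Int) + 1) = (((pre ++ [l]).length : Nat) : Int) by simp,
          show (pre ++ l :: ls) = ((pre ++ [l]) ++ ls) by simp, ih (pre ++ [l])]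
      rw [pvG]
      simp [hb]

-- ===== VERDICT (by name: the statement is the Claim_ definition above) =====
theorem chunk_daml_file_py_spec : Claim_equal_chunk_daml_file_py := by
  intro content file_name _
  unfold Spec_chunk_daml_file_py chunk_daml_file_py chunk_daml_file_py_alt
  have hB := pvBEmit_eq_pvG ((PySem.Str.split? content "\n").getD []) []
  simp only [List.nil_append, List.length_nil, Nat.cast_zero] at hB
  rw [hB]
  exact pvA_loop_pre ((PySem.Str.split? content "\n").getD []) _
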